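-- pv_equiv track=rewrite | github.com/UCF-CMR/Qpace-RaspberryPi | Scripts/qpaceQUIP.py | getParity
-- ===== SOURCE A (Python) =====
-- def getParity(info):
--     parity = int(bin(info[0])[2])
--     for bit in bin(info[0])[3:]:
--         parity ^= int(bit)
--     for byte in info[1:]:
--         for bit in bin(byte)[2:]:
--             parity ^= int(bit)
--     return parity
-- ===== SOURCE B (Python) =====
-- def getParity(info):
--     count = bin(info[0]).count('1')
--     for byte in info[1:]:
--         count += bin(byte).count('1')
--     return count & 1
-- ===== Notes on version B (the rewrite author's own statement) =====
-- stated objective: simpler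
-- what changed: Replaces the per-bit XOR loops over the binary-string digits with a single pass summing popcounts (bin(x).count('1'), counted in C) and one final '& 1'.
import Mathlib
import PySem

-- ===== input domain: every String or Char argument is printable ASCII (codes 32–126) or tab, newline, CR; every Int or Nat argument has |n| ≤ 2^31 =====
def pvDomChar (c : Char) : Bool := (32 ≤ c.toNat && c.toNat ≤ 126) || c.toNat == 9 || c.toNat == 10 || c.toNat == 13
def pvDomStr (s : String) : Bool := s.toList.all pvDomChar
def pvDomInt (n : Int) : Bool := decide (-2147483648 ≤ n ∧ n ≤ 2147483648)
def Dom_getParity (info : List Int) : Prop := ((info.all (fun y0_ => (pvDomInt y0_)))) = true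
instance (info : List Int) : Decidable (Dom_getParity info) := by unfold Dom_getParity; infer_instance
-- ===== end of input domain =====

-- B replaces A's per-bit XOR loops over the binary digit string with a popcount sum and one final '& 1' (simpler).


-- ===== PORT A =====
-- the digit list of bin(n)[2:], MSB first, for 0 ≤ n (exact there; Pre_ admits only nonnegative entries)
def binDigits (n : Nat) : List Nat :=
  if _h : n < 2 then [n] else binDigits (n / 2) ++ [n % 2]
termination_by n
decreasing_by exact Nat.div_lt_self (by omega) (by omega)

def getParity (info : List Int) : Int :=
  match info with
  | [] => 0  -- Python raises IndexError on info[0]; excluded by Pre_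
  | h :: t =>
    let ds : List Int := (binDigits h.natAbs).map Int.ofNat   -- bin(info[0])[2:]
    let parity : Int := ds.headI                              -- parity = int(bin(info[0])[2])
    let parity := (ds.drop 1).foldl (fun p b => PySem.Int.bxor p b) parity  -- for bit in bin(info[0])[3:]
    t.foldl (fun p byte =>
      ((binDigits byte.natAbs).map Int.ofNat).foldl (fun p b => PySem.Int.bxor p b) p) parity

-- ===== PORT B =====
def getParity_alt (info : List Int) : Int :=
  match info with
  | [] => 0  -- Python raises IndexError on info[0]; excluded by Pre_
  | h :: t =>
    let count : Int := (PySem.Int.bitCount h : Int)           -- bin(info[0]).count('1')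
    let count := t.foldl (fun c byte => c + (PySem.Int.bitCount byte : Int)) count
    PySem.Int.band count 1                                    -- count & 1

-- ===== PRECONDITION & SPEC =====
-- Pre_ excludes exactly where Python A raises: the empty list (IndexError) and lists with a
-- negative entry (int('b') / int('-') on bin's prefix raises ValueError).
def Pre_getParity (info : List Int) : Prop := info ≠ [] ∧ ∀ x ∈ info, 0 ≤ x
instance (info : List Int) : Decidable (Pre_getParity info) := by unfold Pre_getParity; infer_instance
def pvWitness_getParity : List Int := [5, 3, 2]

def Spec_getParity (info : List Int) (out : Int) : Prop := out = getParity_alt info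
instance (info : List Int) (out : Int) : Decidable (Spec_getParity info out) := by unfold Spec_getParity; infer_instance

-- ===== CLAIM (what is proved, stated in full; the proofs are below) =====
def Claim_equal_getParity : Prop := ∀ (info : List Int), Dom_getParity info → Pre_getParity info → Spec_getParity info (getParity info)

-- ===== LEMMAS AND PROOFS =====

lemma binDigits_lt_two (n : Nat) : ∀ x ∈ binDigits n, x < 2 := by
  induction n using Nat.strong_induction_on with
  | _ n ih =>
    rw [binDigits]
    split
    · intro x hx; simp at hx; omega
    · intro x hx
      rcases List.mem_append.1 hx with h | h
      · exact ih (n / 2) (Nat.div_lt_self (by omega) (by omega)) x h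
      · simp at h; omega

lemma binDigits_sum (n : Nat) : (binDigits n).sum = PySem.Int.bitCount (n : Int) := by
  induction n using Nat.strong_induction_on with
  | _ n ih =>
    rw [binDigits]
    split
    · interval_cases n <;> decide
    · rw [List.sum_append, ih (n / 2) (Nat.div_lt_self (by omega) (by omega)),
        PySem.Int.bitCount_natCast (show 0 < n by omega)]
      simp; omega

lemma binDigits_ne_nil (n : Nat) : binDigits n ≠ [] := by
  rw [binDigits]; split <;> simp

lemma foldl_bxor_digits (l : List Nat) (p : Nat) (hp : p < 2) (hl : ∀ x ∈ l, x < 2) :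
    (l.map Int.ofNat).foldl (fun a b => PySem.Int.bxor a b) (Int.ofNat p)
      = Int.ofNat ((p + l.sum) % 2) := by
  induction l generalizing p with
  | nil => simp [Nat.mod_eq_of_lt hp]
  | cons x xs ih =>
    have hx : x < 2 := hl x (by simp)
    simp only [List.map_cons, List.foldl_cons, List.sum_cons]
    have h1 : PySem.Int.bxor (Int.ofNat p) (Int.ofNat x) = Int.ofNat ((p + x) % 2) := by
      interval_cases p <;> interval_cases x <;> decide
    rw [h1, ih ((p + x) % 2) (Nat.mod_lt _ (by omega)) (fun y hy => hl y (by simp [hy]))]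
    congr 1
    omega

-- after the first element, each step folds in one byte's digits; the state stays a 0/1 parity
lemma foldl_bytes (t : List Int) (p : Nat) (hp : p < 2) :
    t.foldl (fun p byte =>
        ((binDigits byte.natAbs).map Int.ofNat).foldl (fun a b => PySem.Int.bxor a b) p)
      (Int.ofNat p)
      = Int.ofNat ((p + (t.map (fun b => PySem.Int.bitCount b)).sum) % 2) := by
  induction t generalizing p with
  | nil => simp [Nat.mod_eq_of_lt hp]
  | cons x xs ih =>
    simp only [List.foldl_cons, List.map_cons, List.sum_cons]
    rw [foldl_bxor_digits _ p hp (binDigits_lt_two _), binDigits_sum,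
      ih _ (Nat.mod_lt _ (by omega))]
    congr 1
    have : PySem.Int.bitCount x.natAbs = PySem.Int.bitCount x := by
      rcases Int.natAbs_eq x with h | h
      · rw [← h]
      · conv_rhs => rw [h]
        rw [PySem.Int.bitCount_neg]
    rw [← this]
    omega

lemma band_one_nat_sum (a b : Nat) :
    PySem.Int.band ((a : Int) + (b : Int)) 1 = Int.ofNat ((a + b) % 2) := by
  have h := PySem.Int.band_natCast (a + b) 1
  push_cast at h ⊢
  simpa [Nat.and_one_is_mod] using h

-- ===== VERDICT (by name: the statement is the Claim_ definition above) =====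
theorem getParity_spec : Claim_equal_getParity := by
  intro info _ hpre
  unfold Spec_getParity
  match info with
  | [] => exact absurd rfl hpre.1
  | h :: t =>
    simp only [getParity, getParity_alt]
    obtain ⟨d0, rest, hds⟩ : ∃ d0 rest, binDigits h.natAbs = d0 :: rest := by
      cases hd : binDigits h.natAbs with
      | nil => exact absurd hd (binDigits_ne_nil _)
      | cons a b => exact ⟨a, b, rfl⟩
    have hd0 : d0 < 2 := binDigits_lt_two h.natAbs d0 (by rw [hds]; simp)
    have hrest : ∀ x ∈ rest, x < 2 := fun x hx => binDigits_lt_two h.natAbs x (by rw [hds]; simp [hx])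
    rw [hds]
    simp only [List.map_cons, List.headI, List.drop_succ_cons, List.drop_zero]
    rw [foldl_bxor_digits rest d0 hd0 hrest,
      foldl_bytes t _ (Nat.mod_lt _ (by omega)),
      PySem.List.foldl_add t (fun byte => (PySem.Int.bitCount byte : Int)) _]
    have hcount : PySem.Int.bitCount h = (d0 :: rest).sum := by
      have hs := binDigits_sum h.natAbs
      rw [hds] at hs
      rw [← Int.natAbs_of_nonneg (hpre.2 h (by simp)), ← hs]
    have hsum : ∀ (l : List Int), ((l.map (fun b => (PySem.Int.bitCount b : Int))).sum)
        = ((l.map (fun b => PySem.Int.bitCount b)).sum : Nat) := by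
      intro l
      induction l with
      | nil => simp
      | cons y ys ih => simpa using ih
    rw [hcount, hsum t, band_one_nat_sum]
    congr 1
    simp only [List.sum_cons]
    omega
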